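-- pv_equiv track=rewrite | github.com/acientemple/zhejiangzhiyuan | build_subject_requirements_db.py | merge_multiline_text
-- ===== SOURCE A (Python) =====
-- def merge_multiline_text(lines, start_idx, end_markers):
--     """合并跨行的文本，直到遇到结束标记"""
--     result = []
--     i = start_idx
--     while i < len(lines):
--         line = lines[i].strip()
--         # 检查是否是结束标记行
--         if any(marker in line for marker in end_markers):
--             break
--         result.append(line)
--         i += 1
--     return ''.join(result), i  # 返回合并后的文本和处理的行数
-- ===== SOURCE B (Python) =====
-- def merge_multiline_text(lines, start_idx, end_markers):
--     n = len(lines)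
--     stop = next((j for j in range(start_idx, n)
--                  if any(m in lines[j].strip() for m in end_markers)),
--                 max(start_idx, n))
--     return ''.join(lines[j].strip() for j in range(start_idx, stop)), stop
-- ===== Notes on version B (the rewrite author's own statement) =====
-- stated objective: alternative
-- what changed: A's single fused while-loop that accumulates stripped lines until a marker is replaced by two separate phases: first find the stop index (first index in range(start_idx, len) whose stripped line contains a marker, defaulting to max(start_idx, len)), then join the stripped lines of that range.
import Mathlib
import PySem

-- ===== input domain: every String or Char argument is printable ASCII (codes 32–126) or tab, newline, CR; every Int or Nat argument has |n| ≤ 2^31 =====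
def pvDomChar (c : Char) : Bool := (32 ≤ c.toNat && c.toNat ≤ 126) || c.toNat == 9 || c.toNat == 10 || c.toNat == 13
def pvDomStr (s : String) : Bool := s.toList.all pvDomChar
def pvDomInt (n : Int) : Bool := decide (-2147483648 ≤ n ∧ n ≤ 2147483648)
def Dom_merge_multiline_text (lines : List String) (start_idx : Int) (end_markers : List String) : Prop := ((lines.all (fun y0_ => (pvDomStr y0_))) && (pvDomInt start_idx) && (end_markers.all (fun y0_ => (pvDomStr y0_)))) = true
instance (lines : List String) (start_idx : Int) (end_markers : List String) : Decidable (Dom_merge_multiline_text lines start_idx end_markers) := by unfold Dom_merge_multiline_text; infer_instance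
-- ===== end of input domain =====

-- B computes the same result in two phases (find the stop index, then join that range)
-- instead of A's fused accumulating while-loop; alternative decomposition, not claimed faster.

-- ===== PORT A =====
-- A's while-loop: i counts up from start_idx; structural recursion on (len - i).toNat.
def merge_multiline_text_loop (lines : List String) (end_markers : List String)
    (i : Int) (result : List String) : String × Int :=
  if _h : i < (lines.length : Int) then
    match PySem.List.pyGet? lines i with
    | none => ("", i)  -- Python raises IndexError here (i < -len); excluded by Pre_
    | some s =>
      let line := PySem.Str.strip s
      if end_markers.any (fun marker => PySem.Str.isIn marker line) then
        (PySem.Str.join "" result, i)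
      else
        merge_multiline_text_loop lines end_markers (i + 1) (result ++ [line])
  else
    (PySem.Str.join "" result, i)
termination_by ((lines.length : Int) - i).toNat
decreasing_by omega

def merge_multiline_text (lines : List String) (start_idx : Int) (end_markers : List String) : String × Int :=
  merge_multiline_text_loop lines end_markers start_idx []

-- ===== PORT B =====
def merge_multiline_text_alt (lines : List String) (start_idx : Int) (end_markers : List String) : String × Int :=
  let n : Int := (lines.length : Int)
  let stop : Int :=
    ((PySem.List.pyRange start_idx n 1).find? (fun j =>
        end_markers.any (fun m => PySem.Str.isIn m (PySem.Str.strip (PySem.List.pyGetD lines j ""))))).getD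
      (max start_idx n)
  (PySem.Str.join "" ((PySem.List.pyRange start_idx stop 1).map
      (fun j => PySem.Str.strip (PySem.List.pyGetD lines j ""))), stop)

-- ===== PRECONDITION & SPEC =====
-- Pre_ excludes exactly the inputs where A raises IndexError: start_idx < -len(lines)
-- (then lines[start_idx] is out of range on the first iteration, or on the empty list).
def Pre_merge_multiline_text (lines : List String) (start_idx : Int) (end_markers : List String) : Prop :=
  -(lines.length : Int) ≤ start_idx
instance (lines : List String) (start_idx : Int) (end_markers : List String) : Decidable (Pre_merge_multiline_text lines start_idx end_markers) := by unfold Pre_merge_multiline_text; infer_instance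
def pvWitness_merge_multiline_text : List String × Int × List String :=
  ([" a ", "b", "END x", "c"], 0, ["END"])
def Spec_merge_multiline_text (lines : List String) (start_idx : Int) (end_markers : List String) (out : String × Int) : Prop := out = merge_multiline_text_alt lines start_idx end_markers
instance (lines : List String) (start_idx : Int) (end_markers : List String) (out : String × Int) : Decidable (Spec_merge_multiline_text lines start_idx end_markers out) := by unfold Spec_merge_multiline_text; infer_instance

-- ===== CLAIM (what is proved, stated in full; the proofs are below) =====
def Claim_equal_merge_multiline_text : Prop := ∀ (lines : List String) (start_idx : Int) (end_markers : List String), Dom_merge_multiline_text lines start_idx end_markers → Pre_merge_multiline_text lines start_idx end_markers → Spec_merge_multiline_text lines start_idx end_markers (merge_multiline_text lines start_idx end_markers)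

-- ===== LEMMAS AND PROOFS =====

-- proof helpers (used only below the claim block)
def pvPred (lines end_markers : List String) (j : Int) : Bool :=
  end_markers.any (fun m => PySem.Str.isIn m (PySem.Str.strip (PySem.List.pyGetD lines j "")))

def pvStop (lines end_markers : List String) (i : Int) : Int :=
  ((PySem.List.pyRange i (lines.length : Int) 1).find? (pvPred lines end_markers)).getD
    (max i (lines.length : Int))

theorem pvStop_lt (lines end_markers : List String) (i : Int) (hi : i < (lines.length : Int))
    (hp : pvPred lines end_markers i = false) : i < pvStop lines end_markers i := by
  unfold pvStop
  rw [PySem.List.pyRange_one_cons hi]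
  simp only [List.find?_cons, hp]
  cases hf : (PySem.List.pyRange (i + 1) (lines.length : Int) 1).find? (pvPred lines end_markers) with
  | none => simp; omega
  | some j =>
    have hj := List.mem_of_find?_eq_some hf
    rw [PySem.List.mem_pyRange_one] at hj
    simp; omega

theorem pvStop_step (lines end_markers : List String) (i : Int) (hi : i < (lines.length : Int))
    (hp : pvPred lines end_markers i = false) :
    pvStop lines end_markers i = pvStop lines end_markers (i + 1) := by
  unfold pvStop
  rw [PySem.List.pyRange_one_cons hi]
  simp only [List.find?_cons, hp]
  cases hf : (PySem.List.pyRange (i + 1) (lines.length : Int) 1).find? (pvPred lines end_markers) with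
  | none => simp; omega
  | some j => simp

theorem loop_eq_alt (lines end_markers : List String) :
    ∀ (i : Int) (result : List String), -(lines.length : Int) ≤ i →
      merge_multiline_text_loop lines end_markers i result =
        (PySem.Str.join "" (result ++ (PySem.List.pyRange i (pvStop lines end_markers i) 1).map
            (fun j => PySem.Str.strip (PySem.List.pyGetD lines j ""))), pvStop lines end_markers i) := by
  intro i result h
  generalize hn : ((lines.length : Int) - i).toNat = n
  induction n generalizing i result with
  | zero =>
    have hge : (lines.length : Int) ≤ i := by omega
    rw [merge_multiline_text_loop]
    have hstop : pvStop lines end_markers i = i := by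
      unfold pvStop
      rw [PySem.List.pyRange_one_eq_nil hge]
      simp; omega
    rw [hstop, PySem.List.pyRange_one_eq_nil (le_refl i)]
    simp [hge]
  | succ n ih =>
    have hi : i < (lines.length : Int) := by omega
    obtain ⟨s, hs⟩ : ∃ s, PySem.List.pyGet? lines i = some s := by
      cases hg : PySem.List.pyGet? lines i with
      | none =>
        rw [PySem.List.pyGet?_eq_none_iff] at hg
        exact absurd ⟨h, hi⟩ hg
      | some s => exact ⟨s, rfl⟩
    have hd : PySem.List.pyGetD lines i "" = s := by
      simp [PySem.List.pyGetD, hs]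
    rw [merge_multiline_text_loop]
    simp only [hi, dif_pos, hs]
    by_cases hp : end_markers.any (fun marker => PySem.Str.isIn marker (PySem.Str.strip s)) = true
    · have hpred : pvPred lines end_markers i = true := by
        unfold pvPred; rw [hd]; exact hp
      have hstop : pvStop lines end_markers i = i := by
        unfold pvStop
        rw [PySem.List.pyRange_one_cons hi]
        simp only [List.find?_cons, hpred]
        simp
      rw [if_pos hp, hstop, PySem.List.pyRange_one_eq_nil (le_refl i)]
      simp
    · have hp' : (end_markers.any fun marker => PySem.Str.isIn marker (PySem.Str.strip s)) = false := by
        simpa using hp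
      have hpred : pvPred lines end_markers i = false := by
        unfold pvPred; rw [hd]; exact hp'
      rw [if_neg hp]
      rw [ih (i + 1) (result ++ [PySem.Str.strip s]) (by omega) (by omega)]
      have hlt := pvStop_lt lines end_markers i hi hpred
      have hstep := pvStop_step lines end_markers i hi hpred
      rw [← hstep]
      rw [PySem.List.pyRange_one_cons hlt]
      simp [hd]

-- ===== VERDICT (by name: the statement is the Claim_ definition above) =====
theorem merge_multiline_text_spec : Claim_equal_merge_multiline_text := by
  intro lines start_idx end_markers _hdom hpre
  unfold Spec_merge_multiline_text merge_multiline_text merge_multiline_text_alt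
  rw [loop_eq_alt lines end_markers start_idx [] hpre]
  simp only [List.nil_append]
  rfl
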